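-- pv_equiv track=rewrite | github.com/HEETHUB/Python_Algorithm_2021 | HW3/P9.py | P9
-- ===== SOURCE A (Python) =====
-- from typing import List
--
-- def P9(n1: int, n2: int) -> List[int]:
--     ### Modify code here ###
--     result = []
--     if n1 >= n2:
--         for i in range(n2, n1+1):
--             result.append(i)
--     elif n1 < n2:
--         for i in range(n1, n2+1):
--             result.append(i)
--     result.sort(reverse = True)
--     return result
-- ===== SOURCE B (Python) =====
-- from typing import List
--
-- def P9(n1: int, n2: int) -> List[int]:
--     lo, hi = (n2, n1) if n1 >= n2 else (n1, n2)
--     out = list(range(lo, hi + 1))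
--     i, j = 0, len(out) - 1
--     while i < j:
--         out[i], out[j] = out[j], out[i]
--         i += 1
--         j -= 1
--     return out
-- ===== Notes on version B (the rewrite author's own statement) =====
-- stated objective: alternative
-- what changed: B builds the ascending range once and then reverses it in place with a two-pointer swap loop, instead of A's element-by-element append followed by a reverse sort.
import Mathlib
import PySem

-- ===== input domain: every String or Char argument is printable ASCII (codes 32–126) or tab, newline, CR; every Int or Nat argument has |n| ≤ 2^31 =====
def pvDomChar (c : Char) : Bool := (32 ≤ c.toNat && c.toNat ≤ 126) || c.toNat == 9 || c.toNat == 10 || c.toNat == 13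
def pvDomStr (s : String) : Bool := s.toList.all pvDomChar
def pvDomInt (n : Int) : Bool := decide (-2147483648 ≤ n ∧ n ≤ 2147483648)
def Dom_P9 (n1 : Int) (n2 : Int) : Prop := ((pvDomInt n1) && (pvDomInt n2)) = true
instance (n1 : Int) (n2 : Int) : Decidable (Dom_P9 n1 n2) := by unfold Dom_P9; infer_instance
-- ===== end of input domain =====

-- B builds the ascending range once and then reverses it IN PLACE with a two-pointer
-- swap loop, instead of A's append loop followed by a reverse sort (objective: alternative).

-- ===== PORT A =====
-- result = []; append over range; then result.sort(reverse=True)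
def P9 (n1 : Int) (n2 : Int) : List Int :=
  let result : List Int :=
    if n1 ≥ n2 then
      (PySem.List.pyRange n2 (n1 + 1) 1).foldl (fun acc i => acc ++ [i]) []
    else
      (PySem.List.pyRange n1 (n2 + 1) 1).foldl (fun acc i => acc ++ [i]) []
  PySem.List.sorted result (fun x => x) true

-- ===== PORT B =====
-- while i < j: out[i], out[j] = out[j], out[i]; i += 1; j -= 1
-- (inside the loop 0 ≤ i < j < len out, so pyGetD/pySetD are exact for the Python accesses)
def swapRev (xs : List Int) (i j : Int) : List Int :=
  if i < j then
    swapRev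
      (PySem.List.pySetD (PySem.List.pySetD xs i (PySem.List.pyGetD xs j 0)) j
        (PySem.List.pyGetD xs i 0))
      (i + 1) (j - 1)
  else xs
termination_by (j - i).toNat
decreasing_by omega

def P9_alt (n1 : Int) (n2 : Int) : List Int :=
  let p := if n1 ≥ n2 then (n2, n1) else (n1, n2)
  let out := PySem.List.pyRange p.1 (p.2 + 1) 1
  swapRev out 0 ((out.length : Int) - 1)

-- ===== PRECONDITION & SPEC =====
def Spec_P9 (n1 : Int) (n2 : Int) (out : List Int) : Prop := out = P9_alt n1 n2
instance (n1 : Int) (n2 : Int) (out : List Int) : Decidable (Spec_P9 n1 n2 out) := by unfold Spec_P9; infer_instance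

-- ===== CLAIM (what is proved, stated in full; the proofs are below) =====
def Claim_equal_P9 : Prop := ∀ (n1 : Int) (n2 : Int), Dom_P9 n1 n2 → Spec_P9 n1 n2 (P9 n1 n2)

-- ===== LEMMAS AND PROOFS =====

theorem foldl_append_id (xs : List Int) (acc : List Int) :
    xs.foldl (fun acc i => acc ++ [i]) acc = acc ++ xs := by
  induction xs generalizing acc with
  | nil => simp
  | cons x xs ih => simp [List.foldl, ih]

-- sorting an ascending range in reverse yields its reversal
theorem sorted_rev_pyRange (lo hi : Int) :
    PySem.List.sorted (PySem.List.pyRange lo hi 1) (fun x => x) true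
      = (PySem.List.pyRange lo hi 1).reverse := by
  apply PySem.List.sorted_rev_eq_of_perm_of_pairwise_gt
  · exact (PySem.List.pyRange lo hi 1).reverse_perm
  · rw [List.pairwise_reverse]
    exact PySem.List.pairwise_lt_pyRange_one lo hi

-- the two-pointer swap loop reverses the middle segment M and leaves A, B alone
theorem swapRev_invariant (n : Nat) :
    ∀ (M A B : List Int), M.length = n →
      swapRev (A ++ M ++ B) (A.length : Int) ((A.length : Int) + M.length - 1)
        = A ++ M.reverse ++ B := by
  induction n using Nat.strong_induction_on with
  | _ n ih =>
    intro M A B hM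
    by_cases h2 : n ≤ 1
    · -- loop condition i < j is false; M of length ≤ 1 is its own reverse
      rw [swapRev]
      rw [if_neg (by omega)]
      interval_cases n
      · rw [List.length_eq_zero_iff] at hM; simp [hM]
      · obtain ⟨x, rfl⟩ := List.length_eq_one_iff.mp hM
        simp
    · -- n ≥ 2: M = a :: M' ++ [b]
      cases M with
      | nil => exfalso; simp at hM; omega
      | cons a rest =>
          obtain ⟨M', b, rfl⟩ : ∃ M' b, rest = M' ++ [b] := by
            rcases rest.eq_nil_or_concat with h | ⟨M', b, h⟩
            · exfalso; simp [h] at hM; omega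
            · exact ⟨M', b, by simpa [List.concat_eq_append] using h⟩
          simp only [List.length_cons, List.length_append] at hM
          rw [swapRev]
          rw [if_pos (by simp only [List.length_cons, List.length_append]; omega)]
          -- rewrite the index j as a Nat cast so the pysem simp lemmas fire
          have hj : (A.length : Int) + (a :: (M' ++ [b])).length - 1
              = ((A.length + (M'.length + 1) : Nat) : Int) := by
            simp; ring
          rw [hj]
          -- evaluate the two reads and the two writes
          have hxs : A ++ (a :: (M' ++ [b])) ++ B
              = A ++ a :: (M' ++ b :: B) := by simp
          have hlen : A.length + (M'.length + 1) = (A ++ a :: M').length := by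
            simp
          rw [hxs]
          rw [show ((A.length + (M'.length + 1) : Nat) : Int)
              = (((A ++ a :: M').length : Nat) : Int) by rw [hlen]]
          have hread_i : PySem.List.pyGetD (A ++ a :: (M' ++ b :: B)) (A.length : Int) 0 = a := by
            rw [PySem.List.pyGetD_natCast]
            simp [List.getD_eq_getElem?_getD]
          have hread_j : PySem.List.pyGetD (A ++ a :: (M' ++ b :: B))
              (((A ++ a :: M').length : Nat) : Int) 0 = b := by
            rw [PySem.List.pyGetD_natCast]
            rw [show A ++ a :: (M' ++ b :: B) = (A ++ a :: M') ++ b :: B by simp]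
            simp [List.getD_eq_getElem?_getD]
          rw [hread_i, hread_j]
          rw [PySem.List.pySetD_natCast, PySem.List.pySetD_natCast]
          have hset1 : (A ++ a :: (M' ++ b :: B)).set A.length b
              = A ++ b :: (M' ++ b :: B) := by
            rw [List.set_append_right _ _ (le_refl _)]
            simp
          rw [hset1]
          have hset2 : (A ++ b :: (M' ++ b :: B)).set (A ++ a :: M').length a
              = (A ++ [b]) ++ M' ++ ([a] ++ B) := by
            rw [show A ++ b :: (M' ++ b :: B) = (A ++ b :: M') ++ b :: B by simp]
            rw [List.set_append_right _ _ (by simp)]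
            simp
          rw [hset2]
          -- apply the induction hypothesis to the shrunken middle M'
          have hi' : (A.length : Int) + 1 = ((A ++ [b]).length : Int) := by
            simp
          have hj' : (((A ++ a :: M').length : Nat) : Int) - 1
              = ((A ++ [b]).length : Int) + (M'.length : Int) - 1 := by
            simp; ring
          rw [hi', hj']
          rw [ih M'.length (by omega) M' (A ++ [b]) ([a] ++ B) rfl]
          simp

theorem swapRev_reverse (M : List Int) :
    swapRev M 0 ((M.length : Int) - 1) = M.reverse := by
  have := swapRev_invariant M.length M [] [] rfl
  simpa using this

-- ===== VERDICT (by name: the statement is the Claim_ definition above) =====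
theorem P9_spec : Claim_equal_P9 := by
  intro n1 n2 _
  unfold Spec_P9 P9 P9_alt
  by_cases h : n1 ≥ n2
  · simp only [if_pos h, foldl_append_id, List.nil_append,
      sorted_rev_pyRange, swapRev_reverse]
  · simp only [if_neg h, foldl_append_id, List.nil_append,
      sorted_rev_pyRange, swapRev_reverse]
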